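-- pv_equiv track=rewrite | github.com/chdd/Commonsense-Generation-Framework-for-Knowledge-Graph-Embedding | codes/generate_concept.py | get_final_rel2dom_clusting
-- ===== SOURCE A (Python) =====
-- def get_final_rel2dom_clusting(rel2dom_h, rel2dom_t, result_236, result_237, rel_num):
--     rel2dom_h_final = {}
--     rel2dom_t_final = {}
--     for i in range(0, rel_num):
--         for son_list in result_236:
--             if i in son_list:
--                 rel2dom_h_final[i] = son_list
--             else:
--                 continue
--         for son_t_list in result_237:
--             if i + rel_num in son_t_list:
--                 rel2dom_t_final[i] = son_t_list
--             else:
--                 continue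
--     return rel2dom_h_final, rel2dom_t_final
-- ===== SOURCE B (Python) =====
-- def get_final_rel2dom_clusting(rel2dom_h, rel2dom_t, result_236, result_237, rel_num):
--     # Build an index elem -> last cluster containing it, once; then one pass over relations.
--     idx_h = {}
--     for son_list in result_236:
--         for elem in son_list:
--             idx_h[elem] = son_list
--     idx_t = {}
--     for son_t_list in result_237:
--         for elem in son_t_list:
--             idx_t[elem] = son_t_list
--     rel2dom_h_final = {}
--     rel2dom_t_final = {}
--     for i in range(rel_num):
--         if i in idx_h:
--             rel2dom_h_final[i] = idx_h[i]
--         if i + rel_num in idx_t: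
--             rel2dom_t_final[i] = idx_t[i + rel_num]
--     return rel2dom_h_final, rel2dom_t_final
-- ===== Notes on version B (the rewrite author's own statement) =====
-- stated objective: faster
-- what changed: B builds a one-pass elem-to-cluster index dict (last cluster wins) for heads and tails, then maps each relation by a single lookup, replacing A's per-relation membership scan of every cluster list.
import Mathlib
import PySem

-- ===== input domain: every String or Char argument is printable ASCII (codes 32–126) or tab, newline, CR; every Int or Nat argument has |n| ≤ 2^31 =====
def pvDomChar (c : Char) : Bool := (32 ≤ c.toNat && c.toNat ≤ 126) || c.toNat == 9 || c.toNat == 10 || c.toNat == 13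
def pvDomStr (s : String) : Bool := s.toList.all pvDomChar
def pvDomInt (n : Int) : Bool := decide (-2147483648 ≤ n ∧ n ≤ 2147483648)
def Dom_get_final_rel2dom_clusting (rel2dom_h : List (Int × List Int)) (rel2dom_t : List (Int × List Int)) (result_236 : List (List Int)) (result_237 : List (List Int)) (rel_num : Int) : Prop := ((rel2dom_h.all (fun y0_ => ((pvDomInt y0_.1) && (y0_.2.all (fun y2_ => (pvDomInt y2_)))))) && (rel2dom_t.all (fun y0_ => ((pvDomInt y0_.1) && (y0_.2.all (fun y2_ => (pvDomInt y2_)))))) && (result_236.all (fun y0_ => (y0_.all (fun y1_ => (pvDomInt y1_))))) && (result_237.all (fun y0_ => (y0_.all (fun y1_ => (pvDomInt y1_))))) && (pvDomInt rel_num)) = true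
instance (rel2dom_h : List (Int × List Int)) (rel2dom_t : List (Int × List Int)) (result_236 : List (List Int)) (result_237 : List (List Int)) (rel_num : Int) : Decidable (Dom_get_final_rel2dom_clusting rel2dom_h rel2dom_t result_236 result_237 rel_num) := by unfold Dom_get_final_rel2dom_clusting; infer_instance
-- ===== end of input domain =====

-- B replaces the per-relation scan of every cluster by a one-shot elem->cluster index (one pass over the data): faster by mechanism, same results.
-- ===== PORT A =====
def get_final_rel2dom_clusting (rel2dom_h : List (Int × List Int)) (rel2dom_t : List (Int × List Int)) (result_236 : List (List Int)) (result_237 : List (List Int)) (rel_num : Int) : (List (Int × List Int)) × (List (Int × List Int)) :=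
  let p := (PySem.List.pyRange 0 rel_num 1).foldl
    (fun (st : PySem.Dict Int (List Int) × PySem.Dict Int (List Int)) i =>
      let dh := result_236.foldl
        (fun dh son_list => if i ∈ son_list then dh.insert i son_list else dh) st.1
      let dt := result_237.foldl
        (fun dt son_t_list => if i + rel_num ∈ son_t_list then dt.insert i son_t_list else dt) st.2
      (dh, dt))
    (PySem.Dict.empty, PySem.Dict.empty)
  (p.1.items, p.2.items)

-- ===== PORT B =====
def get_final_rel2dom_clusting_alt (rel2dom_h : List (Int × List Int)) (rel2dom_t : List (Int × List Int)) (result_236 : List (List Int)) (result_237 : List (List Int)) (rel_num : Int) : (List (Int × List Int)) × (List (Int × List Int)) :=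
  let idx_h := result_236.foldl
    (fun m son_list => son_list.foldl (fun m elem => m.insert elem son_list) m)
    (PySem.Dict.empty : PySem.Dict Int (List Int))
  let idx_t := result_237.foldl
    (fun m son_t_list => son_t_list.foldl (fun m elem => m.insert elem son_t_list) m)
    (PySem.Dict.empty : PySem.Dict Int (List Int))
  let p := (PySem.List.pyRange 0 rel_num 1).foldl
    (fun (st : PySem.Dict Int (List Int) × PySem.Dict Int (List Int)) i =>
      let dh := match idx_h.get? i with
        | some l => st.1.insert i l
        | none => st.1
      let dt := match idx_t.get? (i + rel_num) with
        | some l => st.2.insert i l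
        | none => st.2
      (dh, dt))
    (PySem.Dict.empty, PySem.Dict.empty)
  (p.1.items, p.2.items)

-- ===== PRECONDITION & SPEC =====
def Spec_get_final_rel2dom_clusting (rel2dom_h : List (Int × List Int)) (rel2dom_t : List (Int × List Int)) (result_236 : List (List Int)) (result_237 : List (List Int)) (rel_num : Int) (out : (List (Int × List Int)) × (List (Int × List Int))) : Prop := out = get_final_rel2dom_clusting_alt rel2dom_h rel2dom_t result_236 result_237 rel_num
instance (rel2dom_h : List (Int × List Int)) (rel2dom_t : List (Int × List Int)) (result_236 : List (List Int)) (result_237 : List (List Int)) (rel_num : Int) (out : (List (Int × List Int)) × (List (Int × List Int))) : Decidable (Spec_get_final_rel2dom_clusting rel2dom_h rel2dom_t result_236 result_237 rel_num out) := by unfold Spec_get_final_rel2dom_clusting; infer_instance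

-- ===== CLAIM (what is proved, stated in full; the proofs are below) =====
def Claim_equal_get_final_rel2dom_clusting : Prop := ∀ (rel2dom_h : List (Int × List Int)) (rel2dom_t : List (Int × List Int)) (result_236 : List (List Int)) (result_237 : List (List Int)) (rel_num : Int), Dom_get_final_rel2dom_clusting rel2dom_h rel2dom_t result_236 result_237 rel_num → Spec_get_final_rel2dom_clusting rel2dom_h rel2dom_t result_236 result_237 rel_num (get_final_rel2dom_clusting rel2dom_h rel2dom_t result_236 result_237 rel_num)

-- ===== LEMMAS AND PROOFS =====

/-- The last list of `ls` (in iteration order) that contains `j`, if any. -/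
def pvLastFind (j : Int) : List (List Int) → Option (List Int)
  | [] => none
  | l :: ls => match pvLastFind j ls with
    | some r => some r
    | none => if j ∈ l then some l else none

/-- A's inner scan over the cluster lists equals a single conditional insert of the
    last list containing `j`. -/
theorem pvInnerA_eq (j k : Int) (ls : List (List Int)) (d : PySem.Dict Int (List Int)) :
    ls.foldl (fun d l => if j ∈ l then d.insert k l else d) d =
      match pvLastFind j ls with
      | some r => d.insert k r
      | none => d := by
  induction ls generalizing d with
  | nil => rfl
  | cons l ls ih =>
    simp only [List.foldl_cons, pvLastFind, ih]
    cases h : pvLastFind j ls with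
    | some r =>
      split_ifs with hj
      · exact PySem.Dict.insert_insert_self ..
      · rfl
    | none =>
      split_ifs with hj <;> rfl

/-- Lookup in the fold that records one list for all its elements. -/
theorem pvInnerIdx_get? (j : Int) (l : List Int) (es : List Int) (m : PySem.Dict Int (List Int)) :
    (es.foldl (fun m e => m.insert e l) m).get? j =
      if j ∈ es then some l else m.get? j := by
  induction es generalizing m with
  | nil => simp
  | cons e es ih =>
    simp only [List.foldl_cons, ih, List.mem_cons]
    by_cases hes : j ∈ es
    · simp [hes]
    · by_cases hje : j = e
      · subst hje; simp [hes, PySem.Dict.get?_insert_self]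
      · simp [hes, hje, PySem.Dict.get?_insert_of_ne _ _ hje]

/-- Lookup in B's index dict is the last list containing `j`. -/
theorem pvIdx_get? (j : Int) (ls : List (List Int)) (m : PySem.Dict Int (List Int)) :
    (ls.foldl (fun m l => l.foldl (fun m e => m.insert e l) m) m).get? j =
      match pvLastFind j ls with
      | some r => some r
      | none => m.get? j := by
  induction ls generalizing m with
  | nil => rfl
  | cons l ls ih =>
    simp only [List.foldl_cons, ih, pvInnerIdx_get?]
    cases h : pvLastFind j ls with
    | some r => simp [pvLastFind, h]
    | none => simp only [pvLastFind, h]; split_ifs <;> rfl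

-- ===== VERDICT (by name: the statement is the Claim_ definition above) =====
theorem get_final_rel2dom_clusting_spec : Claim_equal_get_final_rel2dom_clusting := by
  intro rel2dom_h rel2dom_t result_236 result_237 rel_num _
  show _ = _
  unfold get_final_rel2dom_clusting get_final_rel2dom_clusting_alt
  have hstep : ∀ (st : PySem.Dict Int (List Int) × PySem.Dict Int (List Int)) (i : Int),
      ((result_236.foldl (fun dh son_list => if i ∈ son_list then dh.insert i son_list else dh) st.1),
       (result_237.foldl (fun dt son_t_list => if i + rel_num ∈ son_t_list then dt.insert i son_t_list else dt) st.2)) =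
      ((match (result_236.foldl (fun m son_list => son_list.foldl (fun m elem => m.insert elem son_list) m)
            (PySem.Dict.empty : PySem.Dict Int (List Int))).get? i with
        | some l => st.1.insert i l
        | none => st.1),
       (match (result_237.foldl (fun m son_t_list => son_t_list.foldl (fun m elem => m.insert elem son_t_list) m)
            (PySem.Dict.empty : PySem.Dict Int (List Int))).get? (i + rel_num) with
        | some l => st.2.insert i l
        | none => st.2)) := by
    intro st i
    rw [pvInnerA_eq i i, pvInnerA_eq (i + rel_num) i, pvIdx_get?, pvIdx_get?]
    cases pvLastFind i result_236 <;> cases pvLastFind (i + rel_num) result_237 <;> rfl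
  have hfold : (PySem.List.pyRange 0 rel_num 1).foldl
      (fun (st : PySem.Dict Int (List Int) × PySem.Dict Int (List Int)) i =>
        ((result_236.foldl (fun dh son_list => if i ∈ son_list then dh.insert i son_list else dh) st.1),
         (result_237.foldl (fun dt son_t_list => if i + rel_num ∈ son_t_list then dt.insert i son_t_list else dt) st.2)))
      (PySem.Dict.empty, PySem.Dict.empty) =
      (PySem.List.pyRange 0 rel_num 1).foldl
      (fun (st : PySem.Dict Int (List Int) × PySem.Dict Int (List Int)) i =>
        ((match (result_236.foldl (fun m son_list => son_list.foldl (fun m elem => m.insert elem son_list) m)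
              (PySem.Dict.empty : PySem.Dict Int (List Int))).get? i with
          | some l => st.1.insert i l
          | none => st.1),
         (match (result_237.foldl (fun m son_t_list => son_t_list.foldl (fun m elem => m.insert elem son_t_list) m)
              (PySem.Dict.empty : PySem.Dict Int (List Int))).get? (i + rel_num) with
          | some l => st.2.insert i l
          | none => st.2)))
      (PySem.Dict.empty, PySem.Dict.empty) := by
    congr 1
    funext st i
    exact hstep st i
  simp only [hfold]
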